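-- pv_equiv track=rewrite | github.com/Dk0071942/SyncTalk_2D | test_loop_detailed.py | create_frame_sequence_original
-- ===== SOURCE A (Python) =====
-- def create_frame_sequence_original(total_frames, available_frames, start_frame, loop_back=True):
--     """Original logic from the app"""
--     frame_sequence = []
--
--     if total_frames <= available_frames:
--         # Audio is shorter than video: use frames from start_frame forward
--         for i in range(total_frames):
--             frame_sequence.append((start_frame + i) % available_frames)
--     else:
--         # Audio is longer than video: create a looping pattern
--         # First, go forward through all frames
--         forward_frames = list(range(start_frame, start_frame + available_frames))
--         # Then go backward (excluding first and last to avoid repetition)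
--         backward_frames = list(range(start_frame + available_frames - 2, start_frame, -1))
--
--         # Create a full cycle
--         full_cycle = forward_frames + backward_frames
--         cycle_length = len(full_cycle)
--
--         # Fill the sequence by repeating the cycle
--         for i in range(total_frames):
--             frame_sequence.append(full_cycle[i % cycle_length] % available_frames)
--
--     # Ensure we end with the starting frame for seamless loop (if enabled)
--     if loop_back and total_frames > 1 and frame_sequence[-1] != start_frame:
--         # Adjust the last few frames to smoothly return to start
--         transition_frames = min(10, total_frames // 4)  # Use up to 10 frames for transition
--         for i in range(transition_frames):
--             idx = total_frames - transition_frames + i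
--             if idx < total_frames:
--                 # Linear interpolation back to start frame
--                 progress_ratio = i / transition_frames
--                 # Gradually move back to start frame
--                 if progress_ratio > 0.5:
--                     frame_sequence[idx] = start_frame
--
--     return frame_sequence
-- ===== SOURCE B (Python) =====
-- def create_frame_sequence_original(total_frames, available_frames, start_frame, loop_back=True):
--     """Chunked construction: the sequence is assembled from whole range() blocks
--     (a rotated range for the forward part, its reversed interior for the backward
--     part), tiled to length by list replication and truncation -- no per-frame loop."""
--     if total_frames <= 0:
--         return []
--     a = available_frames
--     r = start_frame % a
--     if total_frames <= a:
--         seq = list(range(r, min(a, r + total_frames))) + list(range(r + total_frames - a))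
--     else:
--         fw = list(range(r, a)) + list(range(r))
--         cycle = fw + fw[1:len(fw) - 1][::-1]
--         reps = -(-total_frames // len(cycle))
--         seq = (cycle * reps)[:total_frames]
--     if loop_back and total_frames > 1 and seq[-1] != start_frame:
--         t = min(10, total_frames // 4)
--         k = t - t // 2 - 1
--         if k > 0:
--             seq[-k:] = [start_frame] * k
--     return seq
-- ===== Notes on version B (the rewrite author's own statement) =====
-- stated objective: faster
-- what changed: B builds the sequence from whole range() blocks — a rotated range plus its reversed interior — tiled to length by list replication and truncation, with the transition tail done by one slice assignment, instead of A's per-frame append loop indexing a precomputed cycle table modulo its length.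
import Mathlib
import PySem

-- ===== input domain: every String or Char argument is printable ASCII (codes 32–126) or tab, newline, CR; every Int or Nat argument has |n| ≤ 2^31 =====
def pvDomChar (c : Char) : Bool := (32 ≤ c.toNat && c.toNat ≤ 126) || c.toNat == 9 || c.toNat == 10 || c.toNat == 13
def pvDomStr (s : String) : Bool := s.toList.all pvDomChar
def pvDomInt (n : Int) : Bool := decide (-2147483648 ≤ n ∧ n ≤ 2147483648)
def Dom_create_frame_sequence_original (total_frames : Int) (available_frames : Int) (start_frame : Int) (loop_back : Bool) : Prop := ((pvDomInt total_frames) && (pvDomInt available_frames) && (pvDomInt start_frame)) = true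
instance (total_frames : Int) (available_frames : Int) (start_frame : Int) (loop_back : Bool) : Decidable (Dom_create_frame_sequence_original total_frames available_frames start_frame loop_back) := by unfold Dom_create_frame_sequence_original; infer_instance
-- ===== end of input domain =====

-- B assembles the sequence from whole range() blocks (a rotated range plus its reversed interior),
-- tiled to length by list replication and truncation, instead of A's per-frame append loop with a
-- table lookup; the transition tail becomes one slice assignment; objective: faster (constant
-- factor, measured).

-- ===== PORT A =====
-- builds frame_sequence exactly as A's two branches do
def pvBuildA (total_frames : Int) (available_frames : Int) (start_frame : Int) : List Int :=
  if total_frames ≤ available_frames then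
    (PySem.List.pyRange 0 total_frames 1).foldl
      (fun acc i => acc ++ [PySem.Int.mod (start_frame + i) available_frames]) []
  else
    let forward_frames := PySem.List.pyRange start_frame (start_frame + available_frames) 1
    let backward_frames := PySem.List.pyRange (start_frame + available_frames - 2) start_frame (-1)
    let full_cycle := forward_frames ++ backward_frames
    let cycle_length : Int := full_cycle.length
    (PySem.List.pyRange 0 total_frames 1).foldl
      (fun acc i =>
        acc ++ [PySem.Int.mod (PySem.List.pyGetD full_cycle (PySem.Int.mod i cycle_length) 0) available_frames]) []

-- A's loop_back transition loop; 'i / transition_frames > 0.5' on 0 ≤ i < transition_frames ≤ 10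
-- is exactly '2 * i > transition_frames' (these small float quotients compare to 0.5 exactly)
def pvPostA (total_frames : Int) (start_frame : Int) (loop_back : Bool) (seq : List Int) : List Int :=
  if loop_back && decide (1 < total_frames) && (PySem.List.pyGetD seq (-1) 0 != start_frame) then
    let transition_frames := min 10 (PySem.Int.floordiv total_frames 4)
    (PySem.List.pyRange 0 transition_frames 1).foldl
      (fun sq i =>
        let idx := total_frames - transition_frames + i
        if idx < total_frames then
          if 2 * i > transition_frames then PySem.List.pySetD sq idx start_frame else sq
        else sq) seq
  else seq

def create_frame_sequence_original (total_frames : Int) (available_frames : Int) (start_frame : Int) (loop_back : Bool) : List Int :=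
  pvPostA total_frames start_frame loop_back (pvBuildA total_frames available_frames start_frame)

-- ===== PORT B =====
-- B's chunked construction: two range blocks (short case), or a rotated range plus its reversed
-- interior tiled by replication and truncated ('(cycle * reps)[:total]')
def pvBuildB (total_frames : Int) (available_frames : Int) (start_frame : Int) : List Int :=
  let r := PySem.Int.mod start_frame available_frames
  if total_frames ≤ available_frames then
    PySem.List.pyRange r (min available_frames (r + total_frames)) 1 ++
      PySem.List.pyRange 0 (r + total_frames - available_frames) 1
  else
    let fw := PySem.List.pyRange r available_frames 1 ++ PySem.List.pyRange 0 r 1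
    -- fw[1:len(fw)-1][::-1]: the [::-1] slice has step -1 ≠ 0, so slice? is always 'some'
    let cycle := fw ++ (PySem.List.slice? (PySem.List.slice fw (some 1) (some ((fw.length : Int) - 1))) none none (-1)).getD []
    let reps := -(PySem.Int.floordiv (-total_frames) (cycle.length : Int))
    PySem.List.slice (PySem.List.pyRepeat cycle reps) none (some total_frames)

-- B's tail fix-up: 'seq[-k:] = [start_frame] * k' ported by hand as take ++ replicate (exact for 0 < k ≤ len)
def pvPostB (total_frames : Int) (start_frame : Int) (loop_back : Bool) (seq : List Int) : List Int :=
  if loop_back && decide (1 < total_frames) && (PySem.List.pyGetD seq (-1) 0 != start_frame) then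
    let t := min 10 (PySem.Int.floordiv total_frames 4)
    let k := t - PySem.Int.floordiv t 2 - 1
    if 0 < k then seq.take (seq.length - k.toNat) ++ List.replicate k.toNat start_frame else seq
  else seq

def create_frame_sequence_original_alt (total_frames : Int) (available_frames : Int) (start_frame : Int) (loop_back : Bool) : List Int :=
  if total_frames ≤ 0 then []
  else pvPostB total_frames start_frame loop_back (pvBuildB total_frames available_frames start_frame)

-- ===== PRECONDITION & SPEC =====
-- Pre_ excludes exactly the inputs where A raises ZeroDivisionError ('i % cycle_length' with an
-- empty cycle): total_frames ≥ 1 with available_frames ≤ 0.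
def Pre_create_frame_sequence_original (total_frames : Int) (available_frames : Int) (start_frame : Int) (loop_back : Bool) : Prop :=
  total_frames ≤ 0 ∨ 1 ≤ available_frames
instance (total_frames : Int) (available_frames : Int) (start_frame : Int) (loop_back : Bool) : Decidable (Pre_create_frame_sequence_original total_frames available_frames start_frame loop_back) := by unfold Pre_create_frame_sequence_original; infer_instance

def pvWitness_create_frame_sequence_original : Int × Int × Int × Bool := (20, 7, 2, true)

def Spec_create_frame_sequence_original (total_frames : Int) (available_frames : Int) (start_frame : Int) (loop_back : Bool) (out : List Int) : Prop := out = create_frame_sequence_original_alt total_frames available_frames start_frame loop_back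
instance (total_frames : Int) (available_frames : Int) (start_frame : Int) (loop_back : Bool) (out : List Int) : Decidable (Spec_create_frame_sequence_original total_frames available_frames start_frame loop_back out) := by unfold Spec_create_frame_sequence_original; infer_instance

-- ===== CLAIM (what is proved, stated in full; the proofs are below) =====
def Claim_equal_create_frame_sequence_original : Prop := ∀ (total_frames : Int) (available_frames : Int) (start_frame : Int) (loop_back : Bool), Dom_create_frame_sequence_original total_frames available_frames start_frame loop_back → Pre_create_frame_sequence_original total_frames available_frames start_frame loop_back → Spec_create_frame_sequence_original total_frames available_frames start_frame loop_back (create_frame_sequence_original total_frames available_frames start_frame loop_back)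

-- ===== LEMMAS AND PROOFS =====

-- a prefix of a list, written as an indexed map
theorem pv_take_eq_map (c : List Int) (n : Nat) (hn : n ≤ c.length) :
    c.take n = (List.range n).map (fun k => c.getD k 0) := by
  apply List.ext_getElem
  · simp; omega
  · intro k h1 h2
    simp only [List.getElem_take, List.getElem_map, List.getElem_range]
    rw [List.getD_eq_getElem c 0 (by simp at h1; omega)]

-- tiling: a prefix of R copies of c is the cyclic indexed map
theorem pv_tile (R : Nat) : ∀ (c : List Int) (n : Nat), c ≠ [] → n ≤ R * c.length →
    (List.replicate R c).flatten.take n = (List.range n).map (fun k => c.getD (k % c.length) 0) := by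
  induction R with
  | zero => intro c n _ hn; simp at hn; simp [hn]
  | succ R ih =>
    intro c n hc hn
    have hL : 0 < c.length := List.length_pos_of_ne_nil hc
    rw [Nat.succ_mul] at hn
    rw [List.replicate_succ, List.flatten_cons, List.take_append]
    by_cases h : n ≤ c.length
    · have h1 : (List.replicate R c).flatten.take (n - c.length) = [] := by
        have : n - c.length = 0 := by omega
        simp [this]
      rw [h1, List.append_nil, pv_take_eq_map c n h]
      apply List.map_congr_left
      intro k hk
      simp only [List.mem_range] at hk
      rw [Nat.mod_eq_of_lt (by omega)]
    · have hsplit : n = c.length + (n - c.length) := by omega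
      rw [ih c (n - c.length) hc (by omega)]
      conv_rhs => rw [hsplit]
      rw [List.range_add, List.map_append, List.map_map]
      rw [List.take_of_length_le (by omega : c.length ≤ n)]
      congr 1
      · have hC : c = (List.range c.length).map (fun k => c.getD k 0) := by
          rw [← pv_take_eq_map c c.length le_rfl, List.take_length]
        conv_lhs => rw [hC]
        apply List.map_congr_left
        intro k hk
        simp only [List.mem_range] at hk
        rw [Nat.mod_eq_of_lt hk]
      · apply List.map_congr_left
        intro k _
        simp [Nat.add_mod_left]

-- rotation step: where '(s + k) % a' lands relative to 's % a', for 0 <= k < a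
theorem pv_emod_rot (s a k : Int) (ha0 : 0 < a) (hk0 : 0 ≤ k) (hka : k < a) :
    (s + k) % a = if k < a - s % a then s % a + k else s % a + k - a := by
  have h1 : (s + k) % a = (s % a + k % a) % a := Int.add_emod s k a
  have h2 : k % a = k := Int.emod_eq_of_lt hk0 hka
  have hsr0 : 0 ≤ s % a := Int.emod_nonneg s (by omega)
  have hsra : s % a < a := Int.emod_lt_of_pos s ha0
  rw [h1, h2]
  split_ifs with h
  · exact Int.emod_eq_of_lt (by omega) (by omega)
  · rw [← Int.sub_emod_right (s % a + k) a]
    exact Int.emod_eq_of_lt (by omega) (by omega)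

-- the forward rotation: mapping '% a' over range(s, s+a) gives the two chunks range(r,a)+range(0,r)
theorem pv_fw_eq (a s : Int) (ha : 1 ≤ a) :
    (PySem.List.pyRange s (s + a) 1).map (fun x => PySem.Int.mod x a)
      = PySem.List.pyRange (PySem.Int.mod s a) a 1 ++ PySem.List.pyRange 0 (PySem.Int.mod s a) 1 := by
  have ha0 : (0:Int) < a := by omega
  have hr := PySem.Int.mod_eq_emod_of_pos (a := s) ha0
  have hr0 : 0 ≤ PySem.Int.mod s a := PySem.Int.mod_nonneg s ha0
  have hra : PySem.Int.mod s a < a := PySem.Int.mod_lt s ha0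
  apply List.ext_getElem
  · simp only [List.length_map, List.length_append, PySem.List.length_pyRange_one]
    omega
  · intro k h1 h2
    have hk1 : (k : Int) < a := by
      simp only [List.length_map, PySem.List.length_pyRange_one] at h1
      omega
    have hsr0 : 0 ≤ s % a := Int.emod_nonneg s (by omega)
    have hsra : s % a < a := Int.emod_lt_of_pos s ha0
    simp only [List.getElem_map, List.getElem_append, PySem.List.getElem_pyRange_one,
      PySem.List.length_pyRange_one, PySem.Int.mod_eq_emod_of_pos ha0]
    rw [pv_emod_rot s a k ha0 (by positivity) hk1]
    split_ifs <;> omega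

-- B's cycle IS A's full_cycle reduced mod a
theorem pv_cycle_eq (a s : Int) (ha : 1 ≤ a) :
    (PySem.List.pyRange s (s + a) 1 ++ PySem.List.pyRange (s + a - 2) s (-1)).map
        (fun x => PySem.Int.mod x a)
      = (PySem.List.pyRange (PySem.Int.mod s a) a 1 ++ PySem.List.pyRange 0 (PySem.Int.mod s a) 1) ++
        (PySem.List.slice?
          (PySem.List.slice (PySem.List.pyRange (PySem.Int.mod s a) a 1 ++ PySem.List.pyRange 0 (PySem.Int.mod s a) 1)
            (some 1) (some (((PySem.List.pyRange (PySem.Int.mod s a) a 1 ++ PySem.List.pyRange 0 (PySem.Int.mod s a) 1).length : Int) - 1)))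
          none none (-1)).getD [] := by
  have ha0 : (0:Int) < a := by omega
  have hr0 : 0 ≤ PySem.Int.mod s a := PySem.Int.mod_nonneg s ha0
  have hra : PySem.Int.mod s a < a := PySem.Int.mod_lt s ha0
  set fw := PySem.List.pyRange (PySem.Int.mod s a) a 1 ++ PySem.List.pyRange 0 (PySem.Int.mod s a) 1 with hfw
  have hlenfw : fw.length = a.toNat := by
    simp only [hfw, List.length_append, PySem.List.length_pyRange_one]; omega
  rw [List.map_append, pv_fw_eq a s ha, ← hfw]
  congr 1
  rw [PySem.List.slice?_none_none_neg_one, Option.getD_some]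
  rw [PySem.List.slice_toNat fw (by omega) (by omega : (0:Int) ≤ (fw.length : Int) - 1)]
  rw [PySem.List.pyRange_neg_one_eq_reverse, List.map_reverse]
  congr 1
  have h1 : PySem.List.pyRange (s + 1) (s + a - 2 + 1) 1 = PySem.List.pyRange (s+1) (s+a-1) 1 := by
    congr 1; omega
  rw [h1]
  have htoNat : ((fw.length : Int) - 1).toNat - Int.toNat 1 = a.toNat - 2 := by
    rw [hlenfw]; omega
  rw [htoNat, hfw, ← pv_fw_eq a s ha]
  rw [← List.map_drop, ← List.map_take]
  congr 1
  have hcons : PySem.List.pyRange s (s + a) 1 = s :: PySem.List.pyRange (s+1) (s+a) 1 :=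
    PySem.List.pyRange_one_cons (by omega)
  rw [hcons]
  simp only [Int.toNat_one, List.drop_succ_cons, List.drop_zero]
  by_cases ha2 : 2 ≤ a
  · rw [PySem.List.pyRange_one_append (s+1) (s+a-1) (s+a) (by omega) (by omega)]
    rw [List.take_left' (by rw [PySem.List.length_pyRange_one]; omega)]
  · have hA1 : a = 1 := by omega
    subst hA1
    rw [PySem.List.pyRange_one_eq_nil (by omega), PySem.List.pyRange_one_eq_nil (by omega)]
    simp

theorem pv_foldl_len {α : Type} (f : List Int → α → List Int)
    (h : ∀ acc x, (f acc x).length = acc.length + 1) :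
    ∀ (l : List α) (init : List Int), (l.foldl f init).length = init.length + l.length := by
  intro l
  induction l with
  | nil => simp
  | cons x xs ih => intro init; simp only [List.foldl_cons, ih, List.length_cons, h]; omega

theorem pv_buildA_len (n a s : Int) : (pvBuildA n a s).length = n.toNat := by
  unfold pvBuildA
  split_ifs with h <;>
    rw [pv_foldl_len _ (by intro acc x; simp)] <;>
    simp [PySem.List.length_pyRange_one]

-- the two builders agree whenever 1 ≤ n and 1 ≤ a
theorem pv_build_eq (n a s : Int) (hn : 1 ≤ n) (ha : 1 ≤ a) :
    pvBuildA n a s = pvBuildB n a s := by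
  have ha0 : (0:Int) < a := by omega
  have hr0 : 0 ≤ PySem.Int.mod s a := PySem.Int.mod_nonneg s ha0
  have hra : PySem.Int.mod s a < a := PySem.Int.mod_lt s ha0
  have hrs := PySem.Int.mod_eq_emod_of_pos (a := s) ha0
  unfold pvBuildA pvBuildB
  dsimp only
  split_ifs with h
  · -- forward branch: n ≤ a
    rw [PySem.List.foldl_append_singleton_eq_map, List.nil_append]
    apply List.ext_getElem
    · simp only [List.length_map, List.length_append, PySem.List.length_pyRange_one,
        PySem.Int.mod_eq_emod_of_pos ha0]
      omega
    · intro k h1 h2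
      have hk1 : (k : Int) < n := by
        simp only [List.length_map, PySem.List.length_pyRange_one] at h1
        omega
      have hsr0 : 0 ≤ s % a := Int.emod_nonneg s (by omega)
      have hsra : s % a < a := Int.emod_lt_of_pos s ha0
      simp only [List.getElem_map, List.getElem_append, PySem.List.getElem_pyRange_one,
        PySem.List.length_pyRange_one, PySem.Int.mod_eq_emod_of_pos ha0, zero_add]
      rw [pv_emod_rot s a k ha0 (by positivity) (by omega)]
      split_ifs <;> omega
  · -- looping branch: n > a
    rw [PySem.List.foldl_append_singleton_eq_map, List.nil_append]
    set full := PySem.List.pyRange s (s + a) 1 ++ PySem.List.pyRange (s + a - 2) s (-1) with hfull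
    set fw := PySem.List.pyRange (PySem.Int.mod s a) a 1 ++ PySem.List.pyRange 0 (PySem.Int.mod s a) 1 with hfw
    set cyc := fw ++ (PySem.List.slice? (PySem.List.slice fw (some 1) (some ((fw.length : Int) - 1))) none none (-1)).getD [] with hcyc
    have hcycfull : full.map (fun x => PySem.Int.mod x a) = cyc := pv_cycle_eq a s ha
    have hlenfull : full.length = a.toNat + (a - 2).toNat := by
      simp only [hfull, List.length_append, PySem.List.length_pyRange_one,
        PySem.List.pyRange_neg_one_eq_reverse, List.length_reverse]
      omega
    have hlencyc : cyc.length = full.length := by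
      rw [← hcycfull, List.length_map]
    have hLpos : 0 < full.length := by omega
    -- reps = ceil(n / L): n ≤ reps * L
    have hreps := (PySem.Int.neg_floordiv_neg_eq_iff_of_pos
      (a := n) (b := (cyc.length : Int)) (q := -(PySem.Int.floordiv (-n) (cyc.length : Int)))
      (by rw [hlencyc]; exact_mod_cast hLpos)).mp rfl
    rw [PySem.List.slice_to _ (by omega : (0:Int) ≤ n)]
    unfold PySem.List.pyRepeat
    have hLc : (0:Int) < (cyc.length : Int) := by rw [hlencyc]; exact_mod_cast hLpos
    have h2 : 0 ≤ -(PySem.Int.floordiv (-n) (cyc.length : Int)) := by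
      have := (PySem.Int.floordiv_lt_iff_lt_mul (a := -n) (q := 0) hLc).mpr (by omega)
      omega
    have h3 : (((-(PySem.Int.floordiv (-n) (cyc.length : Int))).toNat * cyc.length : Nat) : Int)
        = (-(PySem.Int.floordiv (-n) (cyc.length : Int))) * (cyc.length : Int) := by
      push_cast
      rw [Int.toNat_of_nonneg h2]
    rw [pv_tile _ cyc n.toNat (by intro hnil; rw [hnil] at hlencyc; simp at hlencyc; omega)
      (by
        have h1 : (n : Int) ≤ (-(PySem.Int.floordiv (-n) (cyc.length : Int))) * (cyc.length : Int) := hreps.2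
        omega)]
    rw [PySem.List.pyRange_one]
    rw [List.map_map]
    have hnn : (n - 0).toNat = n.toNat := by omega
    rw [hnn]
    apply List.map_congr_left
    intro k hk
    simp only [List.mem_range] at hk
    simp only [Function.comp]
    have hz : (0:Int) + (k:Int) = (k:Int) := by omega
    rw [hz]
    have hm : PySem.Int.mod (k : Int) ((full.length : Int)) = ((k % full.length : Nat) : Int) := by
      exact_mod_cast PySem.Int.mod_natCast k full.length
    rw [hm]
    have hklt : k % full.length < full.length := Nat.mod_lt _ hLpos
    rw [PySem.List.pyGetD_natCast, List.getD_eq_getElem full 0 hklt]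
    rw [List.getD_eq_getElem cyc 0 (Nat.mod_lt _ (by omega))]
    simp only [← hcycfull, List.getElem_map, List.length_map]

theorem pv_foldl_id {α β : Type} (l : List α) (init : β) :
    l.foldl (fun s _ => s) init = init := by
  induction l generalizing init <;> simp_all

theorem pv_sets_run (c : Int) :
    ∀ (K : Nat) (l : List Int), K ≤ l.length →
      (List.range K).foldl (fun s j => s.set (l.length - K + j) c) l
        = l.take (l.length - K) ++ List.replicate K c := by
  intro K
  induction K with
  | zero => intro l _; simp
  | succ K ih =>
    intro l hK
    rw [List.range_succ_eq_map]
    simp only [List.foldl_cons, List.foldl_map]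
    have hlen : (l.set (l.length - (K+1) + 0) c).length = l.length := by simp
    have hfun : (fun (s : List Int) (j : Nat) => s.set (l.length - (K+1) + (j+1)) c)
        = (fun s j => s.set ((l.set (l.length - (K+1) + 0) c).length - K + j) c) := by
      funext s j; congr 1; simp; omega
    rw [hfun, ih _ (by simp only [List.length_set]; omega)]
    simp only [hlen]
    have h1 : l.length - (K+1) + 0 = l.length - K - 1 := by omega
    rw [h1]
    have h2 : (l.set (l.length - K - 1) c).take (l.length - K)
        = l.take (l.length - K - 1) ++ [c] := by
      rw [List.take_set, List.set_eq_take_append_cons_drop]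
      rw [if_pos (by simp; omega)]
      rw [List.take_take]
      have hm : min (l.length - K - 1) (l.length - K) = l.length - K - 1 := by omega
      rw [hm]
      have hd : (l.take (l.length - K)).drop (l.length - K - 1 + 1) = [] := by
        apply List.drop_eq_nil_of_le; simp; omega
      rw [hd]
    rw [h2]
    simp only [List.replicate_succ, List.append_assoc, List.singleton_append]
    have h3 : l.length - K - 1 = l.length - (K + 1) := by omega
    rw [h3]

theorem pv_post_eq (n s : Int) (lb : Bool) (seq : List Int) (hlen : seq.length = n.toNat) :
    pvPostA n s lb seq = pvPostB n s lb seq := by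
  unfold pvPostA pvPostB
  split_ifs with hcond
  swap; · rfl
  dsimp only
  have hn : 1 < n := by
    simp only [Bool.and_eq_true, decide_eq_true_eq] at hcond
    exact hcond.1.2
  rw [PySem.Int.floordiv_eq_ediv_of_pos (by norm_num : (0:Int) < 4),
    PySem.Int.floordiv_eq_ediv_of_pos (by norm_num : (0:Int) < 2)]
  set t := min 10 (n / 4) with htdef
  have ht0 : 0 ≤ t := by omega
  have ht10 : t ≤ 10 := by omega
  have htn : 4 * t ≤ n := by omega
  set k := t - t / 2 - 1 with hkdef
  set f : List Int → Int → List Int :=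
    (fun sq i => if n - t + i < n then if 2 * i > t then PySem.List.pySetD sq (n - t + i) s
      else sq else sq) with hf
  by_cases hk : 0 < k
  · rw [if_pos hk]
    have hm1 : (0:Int) ≤ t / 2 + 1 := by omega
    have hm2 : t / 2 + 1 ≤ t := by omega
    rw [PySem.List.pyRange_one_append 0 (t / 2 + 1) t hm1 hm2, List.foldl_append]
    have hinner : List.foldl f seq (PySem.List.pyRange 0 (t / 2 + 1) 1) = seq := by
      rw [hf, PySem.List.foldl_congr_mem _ _ (fun sq _ => sq) _ (by
        intro acc x hx
        rw [PySem.List.mem_pyRange_one] at hx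
        dsimp only
        rw [if_pos (by omega), if_neg (by omega)])]
      exact pv_foldl_id _ _
    rw [hinner]
    rw [hf, PySem.List.foldl_congr_mem _ _
        (fun sq i => sq.set (n - t + i).toNat s) _ (by
      intro acc x hx
      rw [PySem.List.mem_pyRange_one] at hx
      dsimp only
      rw [if_pos (by omega), if_pos (by omega), PySem.List.pySetD_of_nonneg _ _ (by omega)])]
    rw [PySem.List.pyRange_one, List.foldl_map]
    have hfun : (fun (sq : List Int) (kk : Nat) => sq.set (n - t + (t / 2 + 1 + (kk:Int))).toNat s)
        = (fun sq kk => sq.set (seq.length - (t - (t / 2 + 1)).toNat + kk) s) := by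
      funext sq kk; congr 1; omega
    rw [hfun, pv_sets_run s ((t - (t / 2 + 1)).toNat) seq (by omega)]
    have hKk : (t - (t / 2 + 1)).toNat = k.toNat := by omega
    rw [hKk]
  · rw [if_neg hk]
    rw [hf, PySem.List.foldl_congr_mem _ _ (fun sq _ => sq) _ (by
      intro acc x hx
      rw [PySem.List.mem_pyRange_one] at hx
      dsimp only
      rw [if_pos (by omega), if_neg (by omega)])]
    exact pv_foldl_id _ _

-- ===== VERDICT (by name: the statement is the Claim_ definition above) =====
theorem create_frame_sequence_original_spec : Claim_equal_create_frame_sequence_original := by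
  intro n a s lb _hdom hpre
  unfold Spec_create_frame_sequence_original create_frame_sequence_original create_frame_sequence_original_alt
  by_cases hn : n ≤ 0
  · rw [if_pos hn]
    have hbuild : pvBuildA n a s = [] := by
      unfold pvBuildA
      split_ifs <;> rw [PySem.List.pyRange_one_eq_nil (show (n:Int) ≤ 0 by omega)] <;> rfl
    rw [hbuild]
    unfold pvPostA
    rw [if_neg (by simp; intro _ h; omega)]
  · rw [if_neg hn]
    have ha : 1 ≤ a := by
      rcases hpre with h | h; omega; exact h
    rw [pv_build_eq n a s (by omega) ha,
      pv_post_eq n s lb _ (by rw [← pv_build_eq n a s (by omega) ha]; exact pv_buildA_len n a s)]
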